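-- pv_equiv track=rewrite | github.com/jon-zeck/100DaysOfCode | Day 11/blackjack.py | stand
-- ===== SOURCE A (Python) =====
-- def hand_total(cards):
--     total = 0
--     for card in cards:
--         total += card
--     if 11 not in cards:
--         return total
--     elif total <= 21:
--         return total
--     else:
--         # current total is above 21 and there is at least one Ace in the deck. Let's see if we can go lower than 21.
--         for card in cards:
--             if card == 11:
--                 card = 1
--                 total -= 10
--                 if total <= 21:
--                     return total
--     return total
--
-- def stand(player_total, comp_cards, deck):
--     if player_total == 21:
--         return True # blackjack, player wins
--     while hand_total(comp_cards) < player_total: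
--         comp_cards.append(deck.pop())
--     comp_total = hand_total(comp_cards)
--     if comp_total <= 21 and comp_total >= player_total:
--         return False # computer beat player score
--     else:
--         return True # computer lost (either over 21 or below player (although it cant score below player))
-- ===== SOURCE B (Python) =====
-- def hand_total(cards):
--     total = sum(cards)
--     aces = cards.count(11)
--     while total > 21 and aces:
--         total -= 10
--         aces -= 1
--     return total
--
-- def stand(player_total, comp_cards, deck):
--     if player_total == 21:
--         return True
--     cards = list(comp_cards)
--     total = hand_total(cards)
--     for card in reversed(deck):
--         if total >= player_total:
--             break
--         cards.append(card)
--         total = hand_total(cards)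
--     return not (total <= 21 and total >= player_total)
-- ===== Notes on version B (the rewrite author's own statement) =====
-- stated objective: idiomatic
-- what changed: hand_total now computes sum(cards) and cards.count(11) once and reduces aces with a count-driven while loop instead of A's membership test plus per-card rescan with early return; stand draws from a copied deck via a for-loop over reversed(deck) with a cached running total instead of A's mutating while/pop loop that recomputes hand_total per check (return value only: A mutates comp_cards and deck in place, B does not).
import Mathlib
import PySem

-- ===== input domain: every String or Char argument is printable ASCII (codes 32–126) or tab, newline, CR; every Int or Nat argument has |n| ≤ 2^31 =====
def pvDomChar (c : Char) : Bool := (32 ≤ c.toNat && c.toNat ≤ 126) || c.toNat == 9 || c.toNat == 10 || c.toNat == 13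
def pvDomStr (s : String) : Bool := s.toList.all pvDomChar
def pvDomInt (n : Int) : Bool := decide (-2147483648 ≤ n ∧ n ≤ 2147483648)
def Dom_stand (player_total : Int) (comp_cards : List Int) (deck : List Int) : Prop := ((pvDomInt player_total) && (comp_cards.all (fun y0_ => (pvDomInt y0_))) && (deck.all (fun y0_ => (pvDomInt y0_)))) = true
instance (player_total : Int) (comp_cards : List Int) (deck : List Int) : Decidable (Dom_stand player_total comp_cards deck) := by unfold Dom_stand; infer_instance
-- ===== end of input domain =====

-- B recomputes the totals with sum/count plus an ace-count reduction loop and draws from a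
-- copied deck (idiomatic decomposition, no speed claim); equivalence is about the RETURN value
-- only: Python A mutates comp_cards and deck in place, B does not.

-- ===== PORT A =====
-- A's second for-loop over cards: subtract 10 per ace, early return once ≤ 21
def handTotalLoop : List Int → Int → Int
  | [], total => total
  | c :: rest, total =>
    if c = 11 then
      if total - 10 ≤ 21 then total - 10 else handTotalLoop rest (total - 10)
    else handTotalLoop rest total

def hand_total (cards : List Int) : Int :=
  let total := cards.foldl (fun t c => t + c) 0
  if ¬ cards.contains 11 then total
  else if total ≤ 21 then total
  else handTotalLoop cards total

-- A's while-loop: draw (pop from the end of deck) while total < player_total;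
-- none = the loop pops from an empty deck (Python IndexError, excluded by Pre_)
def standLoop (pt : Int) : List Int → List Int → Option (List Int)
  | pool, cards =>
    if hand_total cards < pt then
      match pool with
      | [] => none
      | d :: rest => standLoop pt rest (cards ++ [d])
    else some cards

def stand (player_total : Int) (comp_cards : List Int) (deck : List Int) : Bool :=
  if player_total = 21 then true
  else
    match standLoop player_total deck.reverse comp_cards with
    | none => true  -- Python raises IndexError here; outside Pre_stand
    | some cards =>
      let comp_total := hand_total cards
      if comp_total ≤ 21 ∧ comp_total ≥ player_total then false else true

-- ===== PORT B =====
-- B's hand_total: total = sum, aces = count(11), then the reduction while-loop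
def reduceAces : Nat → Int → Int
  | 0, total => total
  | a + 1, total => if 21 < total then reduceAces a (total - 10) else total

def hand_total_b (cards : List Int) : Int :=
  reduceAces (PySem.List.count cards 11) cards.sum

-- B's for-loop over reversed(deck) with a cached running total (break once total ≥ pt)
def drawLoop (pt : Int) : List Int → List Int → Int → Int
  | [], _, total => total
  | c :: rest, cards, total =>
    if total ≥ pt then total
    else drawLoop pt rest (cards ++ [c]) (hand_total_b (cards ++ [c]))

def stand_alt (player_total : Int) (comp_cards : List Int) (deck : List Int) : Bool :=
  if player_total = 21 then true
  else
    let total := drawLoop player_total deck.reverse comp_cards (hand_total_b comp_cards)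
    ¬ (total ≤ 21 ∧ total ≥ player_total)

-- ===== PRECONDITION & SPEC =====
-- closed-form hand total used only by Pre_: sum, minus 10 per ace as long as over 21
def htPre (cards : List Int) : Int :=
  let s := cards.sum
  if 21 < s then s - 10 * min ((cards.count 11 : Int)) ((s - 12) / 10) else s

-- Pre_ excludes exactly the inputs where A raises IndexError: player_total ≠ 21 and even
-- drawing the whole deck never brings the computer total up to player_total.
def Pre_stand (player_total : Int) (comp_cards : List Int) (deck : List Int) : Prop :=
  player_total = 21 ∨
    ∃ k ∈ List.range (deck.length + 1), player_total ≤ htPre (comp_cards ++ deck.reverse.take k)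
instance (player_total : Int) (comp_cards : List Int) (deck : List Int) : Decidable (Pre_stand player_total comp_cards deck) := by unfold Pre_stand; infer_instance

def pvWitness_stand : Int × List Int × List Int := (18, [10, 5], [11, 4])

def Spec_stand (player_total : Int) (comp_cards : List Int) (deck : List Int) (out : Bool) : Prop := out = stand_alt player_total comp_cards deck
instance (player_total : Int) (comp_cards : List Int) (deck : List Int) (out : Bool) : Decidable (Spec_stand player_total comp_cards deck out) := by unfold Spec_stand; infer_instance

-- ===== CLAIM (what is proved, stated in full; the proofs are below) =====
def Claim_equal_stand : Prop := ∀ (player_total : Int) (comp_cards : List Int) (deck : List Int), Dom_stand player_total comp_cards deck → Pre_stand player_total comp_cards deck → Spec_stand player_total comp_cards deck (stand player_total comp_cards deck)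
-- ===== LEMMAS AND PROOFS =====

-- A's ace-reduction scan in closed form (only reached with total > 21)
theorem handTotalLoop_eq (l : List Int) : ∀ t : Int, 21 < t →
    handTotalLoop l t = t - 10 * min ((l.count 11 : Int)) ((t - 12) / 10) := by
  induction l with
  | nil => intro t ht; simp [handTotalLoop]; omega
  | cons c rest ih =>
    intro t ht
    by_cases hc : c = 11
    · subst hc
      simp only [handTotalLoop]
      rw [List.count_cons_self]
      by_cases hle : t - 10 ≤ 21
      · rw [if_pos hle]; push_cast; omega
      · rw [if_neg hle, ih (t - 10) (by omega)]; push_cast; omega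
    · simp only [handTotalLoop, if_neg hc]
      rw [ih t ht, List.count_cons_of_ne (by simpa using hc)]

-- B's ace-reduction while-loop in the same closed form
theorem reduceAces_eq : ∀ (a : Nat) (t : Int),
    reduceAces a t = if 21 < t then t - 10 * min ((a : Int)) ((t - 12) / 10) else t := by
  intro a
  induction a with
  | zero => intro t; simp [reduceAces]; intro h; omega
  | succ a ih =>
    intro t
    by_cases ht : 21 < t
    · rw [if_pos ht]
      simp only [reduceAces, if_pos ht, ih (t - 10)]
      by_cases ht' : 21 < t - 10
      · rw [if_pos ht']; push_cast; omega
      · rw [if_neg ht']; push_cast; omega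
    · simp [reduceAces, ht]

theorem div_ten_pos {s : Int} (h : 21 < s) : 1 ≤ (s - 12) / 10 := by omega

theorem hand_total_eq_htPre (cards : List Int) : hand_total cards = htPre cards := by
  simp only [hand_total, htPre, List.contains_eq_mem, ← List.sum_eq_foldl]
  by_cases hm : (11 : Int) ∈ cards
  · by_cases hs : cards.sum ≤ 21
    · rw [if_neg (by simp [hm]), if_pos hs, if_neg (by omega)]
    · have h21 : 21 < cards.sum := by omega
      rw [if_neg (by simp [hm]), if_neg hs, if_pos h21]
      exact handTotalLoop_eq cards cards.sum h21
  · have hc : cards.count 11 = 0 := List.count_eq_zero.mpr hm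
    rw [if_pos (by simp [hm] : ¬ (decide ((11:Int) ∈ cards) = true)), hc]
    split_ifs with h21
    · have := div_ten_pos h21
      rw [Nat.cast_zero, min_eq_left (by omega)]; omega
    · rfl

theorem hand_total_b_eq_htPre (cards : List Int) : hand_total_b cards = htPre cards := by
  simp only [hand_total_b, htPre, PySem.List.count_eq, reduceAces_eq]

theorem hand_total_eq_b (cards : List Int) : hand_total cards = hand_total_b cards := by
  rw [hand_total_eq_htPre, hand_total_b_eq_htPre]

-- Both draw loops agree whenever some prefix of the pool reaches player_total
theorem loops_agree (pt : Int) : ∀ (pool cards : List Int),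
    (∃ k, k ≤ pool.length ∧ pt ≤ htPre (cards ++ pool.take k)) →
    ∃ cards', standLoop pt pool cards = some cards' ∧
      hand_total cards' = drawLoop pt pool cards (hand_total_b cards) := by
  intro pool
  induction pool with
  | nil =>
    intro cards hk
    have h0 : pt ≤ htPre cards := by
      rcases hk with ⟨k, hk, hle⟩
      simp only [List.length_nil, Nat.le_zero] at hk
      subst hk; simpa using hle
    have hlt : ¬ hand_total cards < pt := by rw [hand_total_eq_htPre]; omega
    exact ⟨cards, by simp [standLoop, hlt], by simp [drawLoop, hand_total_eq_b]⟩
  | cons c rest ih =>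
    intro cards hk
    by_cases hlt : hand_total cards < pt
    · have hge : ¬ hand_total_b cards ≥ pt := by rw [← hand_total_eq_b]; omega
      rw [standLoop, if_pos hlt]
      rw [drawLoop, if_neg hge]
      apply ih
      rcases hk with ⟨k, hkr, hle⟩
      match k, hkr with
      | 0, _ =>
        exfalso
        rw [hand_total_eq_htPre] at hlt
        rw [List.take_zero, List.append_nil] at hle; omega
      | k + 1, hkr =>
        refine ⟨k, by simp only [List.length_cons] at hkr; omega, ?_⟩
        rw [List.take_succ_cons, List.append_cons] at hle
        exact hle
    · rw [standLoop, if_neg hlt]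
      have hge : hand_total_b cards ≥ pt := by rw [← hand_total_eq_b]; omega
      exact ⟨cards, rfl, by rw [drawLoop, if_pos hge, hand_total_eq_b]⟩

-- ===== VERDICT (by name: the statement is the Claim_ definition above) =====
theorem stand_spec : Claim_equal_stand := by
  intro pt cc deck _ hpre
  unfold Spec_stand stand stand_alt
  by_cases h21 : pt = 21
  · simp [h21]
  · rcases hpre with h | hk
    · exact absurd h h21
    · rw [if_neg h21, if_neg h21]
      have hk' : ∃ k, k ≤ deck.reverse.length ∧ pt ≤ htPre (cc ++ deck.reverse.take k) := by
        rcases hk with ⟨k, hkr, hle⟩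
        simp only [List.mem_range] at hkr
        exact ⟨k, by simp only [List.length_reverse]; omega, hle⟩
      rcases loops_agree pt deck.reverse cc hk' with ⟨cards', hsome, htot⟩
      rw [hsome]
      simp only [← htot]
      by_cases hc : hand_total cards' ≤ 21 ∧ hand_total cards' ≥ pt
      · simp [hc]
      · simp [hc]
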